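-- pv_equiv track=rewrite | github.com/QiweiWen/advent-of-code-2023 | day3/part1.py | find_all_nums
-- ===== SOURCE A (Python) =====
-- def find_all_nums(lines):
--     nums = []
--     for row in range(len(lines)):
--         line = lines[row]
--         ybegin = None
--         yend = None
--         for column in range(len(line)):
--             char = line[column]
--             if char.isdigit():
--                 if ybegin is None:
--                     ybegin = column
--                     yend = column
--                 else:
--                     yend += 1
--             else:
--                 if ybegin is not None:
--                     nums.append((row, ybegin, yend))
--                     ybegin = None
--         if ybegin is not None:
--             nums.append((row, ybegin, yend))
--     return nums
-- ===== SOURCE B (Python) =====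
-- import re
--
-- def find_all_nums(lines):
--     return [(row, m.start(), m.end() - 1)
--             for row, line in enumerate(lines)
--             for m in re.finditer(r'\d+', line)]
-- ===== Notes on version B (the rewrite author's own statement) =====
-- stated objective: idiomatic
-- what changed: Replaced the character-by-character state machine with ybegin/yend accumulators by a re.finditer(r'\d+') comprehension that extracts each maximal digit run per line directly.
import Mathlib
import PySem

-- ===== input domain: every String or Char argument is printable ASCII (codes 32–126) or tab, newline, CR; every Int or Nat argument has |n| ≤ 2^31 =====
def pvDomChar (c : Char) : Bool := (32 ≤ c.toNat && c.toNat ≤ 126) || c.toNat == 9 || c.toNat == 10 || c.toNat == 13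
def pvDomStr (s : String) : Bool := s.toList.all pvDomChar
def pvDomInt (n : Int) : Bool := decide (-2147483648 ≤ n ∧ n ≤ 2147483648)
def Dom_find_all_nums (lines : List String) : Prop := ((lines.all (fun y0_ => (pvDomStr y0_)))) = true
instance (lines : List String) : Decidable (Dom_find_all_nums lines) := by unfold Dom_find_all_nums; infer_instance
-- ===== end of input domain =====

-- B replaces A's per-character ybegin/yend state machine by a run-at-a-time regex scan (idiomatic; same cost).

-- ===== PORT A =====
-- inner loop over the line's characters with column index and ybegin/yend state, plus the trailing flush
def pvLineA (row : Int) (col : Int) (yb ye : Option Int) (nums : List (Int × Int × Int)) :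
    List Char → List (Int × Int × Int)
  | [] =>
    match yb with
    | some b => nums ++ [(row, b, ye.getD 0)]
    | none => nums
  | c :: rest =>
    if PySem.Chars.isdigit c then
      match yb with
      | none => pvLineA row (col + 1) (some col) (some col) nums rest
      | some b => pvLineA row (col + 1) (some b) (ye.map (· + 1)) nums rest
    else
      match yb with
      | some b => pvLineA row (col + 1) none none (nums ++ [(row, b, ye.getD 0)]) rest
      | none => pvLineA row (col + 1) none none nums rest

def find_all_nums (lines : List String) : List (Int × Int × Int) :=
  (PySem.List.enumerate lines).foldl
    (fun nums rl => pvLineA rl.1 0 none none nums rl.2.toList) []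

-- ===== PORT B =====
-- port of re.finditer(r'\d+', line): emit each maximal digit run as (row, start, end-1)
def pvRunsB (row : Int) (i : Int) (cs : List Char) : List (Int × Int × Int) :=
  match cs with
  | [] => []
  | c :: rest =>
    if PySem.Chars.isdigit c then
      let k : Int := ((c :: rest).takeWhile PySem.Chars.isdigit).length
      (row, i, i + k - 1) :: pvRunsB row (i + k) ((c :: rest).dropWhile PySem.Chars.isdigit)
    else
      pvRunsB row (i + 1) rest
termination_by cs.length
decreasing_by
  · simp only [List.dropWhile_cons, *, if_pos]
    exact Nat.lt_succ_of_le (List.length_dropWhile_le _ _)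
  · simp

def find_all_nums_alt (lines : List String) : List (Int × Int × Int) :=
  (PySem.List.enumerate lines).flatMap (fun rl => pvRunsB rl.1 0 rl.2.toList)

-- ===== PRECONDITION & SPEC =====
def Spec_find_all_nums (lines : List String) (out : List (Int × Int × Int)) : Prop := out = find_all_nums_alt lines
instance (lines : List String) (out : List (Int × Int × Int)) : Decidable (Spec_find_all_nums lines out) := by unfold Spec_find_all_nums; infer_instance

-- ===== CLAIM (what is proved, stated in full; the proofs are below) =====
def Claim_equal_find_all_nums : Prop := ∀ (lines : List String), Dom_find_all_nums lines → Spec_find_all_nums lines (find_all_nums lines)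

-- ===== LEMMAS AND PROOFS =====

-- both loop invariants at once (the digit and non-digit branches swap between the two states):
-- in state (none,none) the remaining output is exactly the runs of the suffix; in state (some b, some e)
-- the pending run closes at e + length of the remaining digit prefix
theorem pvLineA_inv (row : Int) (cs : List Char) :
    (∀ (col : Int) (nums : List (Int × Int × Int)),
      pvLineA row col none none nums cs = nums ++ pvRunsB row col cs) ∧
    (∀ (col b e : Int) (nums : List (Int × Int × Int)),
      pvLineA row col (some b) (some e) nums cs =
        nums ++ (row, b, e + ((cs.takeWhile PySem.Chars.isdigit).length : Int)) ::
          pvRunsB row (col + ((cs.takeWhile PySem.Chars.isdigit).length : Int))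
            (cs.dropWhile PySem.Chars.isdigit)) := by
  induction cs with
  | nil => constructor <;> (intros; simp [pvLineA, pvRunsB])
  | cons c rest ih =>
    obtain ⟨ihn, ihs⟩ := ih
    constructor
    · intro col nums
      by_cases h : PySem.Chars.isdigit c
      · simp only [pvLineA, h, if_pos]
        rw [ihs]
        simp only [pvRunsB, h, if_pos, List.takeWhile_cons, List.dropWhile_cons]
        simp
        constructor <;> ring_nf
      · simp [pvLineA, h, pvRunsB, ihn]
    · intro col b e nums
      by_cases h : PySem.Chars.isdigit c
      · simp only [pvLineA, h, if_pos, List.takeWhile_cons, List.dropWhile_cons, Option.map_some]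
        rw [ihs]
        simp
        constructor <;> ring_nf
      · simp only [pvLineA, h, Option.getD_some, List.takeWhile_cons, List.dropWhile_cons,
          Bool.false_eq_true]
        rw [ihn]
        simp [pvRunsB, h]

theorem pvLineA_none (row : Int) (cs : List Char) (col : Int) (nums : List (Int × Int × Int)) :
    pvLineA row col none none nums cs = nums ++ pvRunsB row col cs :=
  (pvLineA_inv row cs).1 col nums

theorem pvFold_flatMap (l : List (Int × String)) :
    ∀ (acc : List (Int × Int × Int)),
      l.foldl (fun nums rl => pvLineA rl.1 0 none none nums rl.2.toList) acc =
        acc ++ l.flatMap (fun rl => pvRunsB rl.1 0 rl.2.toList) := by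
  induction l with
  | nil => simp
  | cons p t ih => intro acc; rw [List.foldl_cons, pvLineA_none, ih]; simp [List.flatMap_cons]

-- ===== VERDICT (by name: the statement is the Claim_ definition above) =====
theorem find_all_nums_spec : Claim_equal_find_all_nums := by
  intro lines _
  unfold Spec_find_all_nums find_all_nums find_all_nums_alt
  rw [pvFold_flatMap]
  simp
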